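-- pv_equiv track=rewrite | github.com/josalvatorre/practice-questions | valid_starting_city.py | valid_starting_city
-- ===== SOURCE A (Python) =====
-- from typing import List
--
-- def valid_starting_city(
--     distances: List[int], fuel: List[int], mpg: int
-- ) -> int:
--     miles_rem = 0
--
--     start_cand = 0
--     start_cand_miles_rem = 0
--
--     for i in range(1, len(distances)):
--
--         dist_from_prev = distances[i - 1]
--         fuel_from_prev = fuel[i - 1]
--
--         miles_rem += (fuel_from_prev * mpg) - dist_from_prev
--
--         if miles_rem < start_cand_miles_rem:
--             start_cand_miles_rem = miles_rem
--             start_cand = i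
--
--     return start_cand
-- ===== SOURCE B (Python) =====
-- from typing import List
--
-- def valid_starting_city(
--     distances: List[int], fuel: List[int], mpg: int
-- ) -> int:
--     # Scan right-to-left with a reset-to-zero relative tank (gas-station
--     # greedy run in reverse): no global minimum is ever tracked.
--     n = len(distances)
--     best = max(n - 1, 0)
--     rel = 0
--     for j in range(n - 2, -1, -1):
--         rel += fuel[j] * mpg - distances[j]
--         if rel >= 0:
--             rel = 0
--             best = j
--     return best
-- ===== Notes on version B (the rewrite author's own statement) =====
-- stated objective: alternative
-- what changed: A scans forward accumulating the running net miles and tracking the global minimum prefix with a strict comparison; B scans the cities right-to-left with a reset-to-zero relative tank (the classic gas-station greedy run in reverse) and never tracks a global minimum.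
import Mathlib
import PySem

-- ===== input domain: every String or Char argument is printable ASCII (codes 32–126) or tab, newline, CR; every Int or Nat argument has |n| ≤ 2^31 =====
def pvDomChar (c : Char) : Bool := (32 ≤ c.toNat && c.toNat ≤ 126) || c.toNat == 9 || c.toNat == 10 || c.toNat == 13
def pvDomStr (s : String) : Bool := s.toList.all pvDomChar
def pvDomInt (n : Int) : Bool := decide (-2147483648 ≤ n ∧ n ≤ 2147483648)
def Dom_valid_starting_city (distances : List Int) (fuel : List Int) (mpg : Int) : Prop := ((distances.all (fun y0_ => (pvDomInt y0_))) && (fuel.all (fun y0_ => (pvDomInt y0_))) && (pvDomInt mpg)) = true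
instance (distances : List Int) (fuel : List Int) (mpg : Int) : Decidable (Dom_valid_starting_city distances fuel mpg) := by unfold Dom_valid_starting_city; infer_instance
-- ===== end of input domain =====

-- B replaces A's forward minimum-prefix scan by the reverse gas-station greedy:
-- scan cities right-to-left with a reset-to-zero relative tank, never tracking a
-- global minimum (objective: alternative algorithm; same return value).

-- ===== PORT A =====
def valid_starting_city (distances : List Int) (fuel : List Int) (mpg : Int) : Int :=
  -- state = (miles_rem, start_cand, start_cand_miles_rem)
  let st := (PySem.List.pyRange 1 (distances.length : Int) 1).foldl
    (fun (st : Int × Int × Int) i =>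
      let dist_from_prev := PySem.List.pyGetD distances (i - 1) 0
      let fuel_from_prev := PySem.List.pyGetD fuel (i - 1) 0
      let miles_rem := st.1 + (fuel_from_prev * mpg - dist_from_prev)
      if miles_rem < st.2.2 then (miles_rem, i, miles_rem)
      else (miles_rem, st.2.1, st.2.2))
    (0, 0, 0)
  st.2.1

-- ===== PORT B =====
def valid_starting_city_alt (distances : List Int) (fuel : List Int) (mpg : Int) : Int :=
  -- state = (best, rel); loop runs j = n-2, n-3, ..., 0
  let n : Int := distances.length
  let st := (PySem.List.pyRange (n - 2) (-1) (-1)).foldl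
    (fun (st : Int × Int) j =>
      let rel := st.2 + (PySem.List.pyGetD fuel j 0 * mpg - PySem.List.pyGetD distances j 0)
      if 0 ≤ rel then (j, 0) else (st.1, rel))
    (max (n - 1) 0, 0)
  st.1

-- ===== PRECONDITION & SPEC =====
-- Pre_ excludes exactly the inputs where both Pythons raise IndexError:
-- fewer than len(distances)-1 fuel entries.
def Pre_valid_starting_city (distances : List Int) (fuel : List Int) (mpg : Int) : Prop :=
  distances.length ≤ fuel.length + 1
instance (distances : List Int) (fuel : List Int) (mpg : Int) : Decidable (Pre_valid_starting_city distances fuel mpg) := by unfold Pre_valid_starting_city; infer_instance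
def pvWitness_valid_starting_city : List Int × List Int × Int := ([5, 25, 15, 10, 15], [1, 2, 1, 0, 3], 10)

def Spec_valid_starting_city (distances : List Int) (fuel : List Int) (mpg : Int) (out : Int) : Prop := out = valid_starting_city_alt distances fuel mpg
instance (distances : List Int) (fuel : List Int) (mpg : Int) (out : Int) : Decidable (Spec_valid_starting_city distances fuel mpg out) := by unfold Spec_valid_starting_city; infer_instance

-- ===== CLAIM (what is proved, stated in full; the proofs are below) =====
def Claim_equal_valid_starting_city : Prop := ∀ (distances : List Int) (fuel : List Int) (mpg : Int), Dom_valid_starting_city distances fuel mpg → Pre_valid_starting_city distances fuel mpg → Spec_valid_starting_city distances fuel mpg (valid_starting_city distances fuel mpg)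

-- ===== LEMMAS AND PROOFS =====

-- pvS g m = running net miles on arrival at city m (sum of the first m deltas);
-- pvMv g m = minimum of pvS over 0..m; pvIx g m = earliest index attaining it.
def pvS (g : Nat → Int) (m : Nat) : Int := ((List.range m).map g).sum
def pvMv (g : Nat → Int) : Nat → Int
  | 0 => 0
  | m + 1 => min (pvMv g m) (pvS g (m + 1))
def pvIx (g : Nat → Int) : Nat → Nat
  | 0 => 0
  | m + 1 => if pvS g (m + 1) < pvMv g m then m + 1 else pvIx g m
-- pvSh g j = deltas of the suffix starting at city j
def pvSh (g : Nat → Int) (j : Nat) : Nat → Int := fun u => g (j + u)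
-- pvGoR g j k = B's (best, rel) state for the suffix of cities j..j+k
def pvGoR (g : Nat → Int) : Nat → Nat → Int × Int
  | j, 0 => ((j : Int), 0)
  | j, k + 1 =>
      let st := pvGoR g (j + 1) k
      let rel := st.2 + g j
      if 0 ≤ rel then ((j : Int), 0) else (st.1, rel)

theorem pvS_zero (g : Nat → Int) : pvS g 0 = 0 := by simp [pvS]

theorem pvS_succ (g : Nat → Int) (m : Nat) : pvS g (m + 1) = pvS g m + g m := by
  simp [pvS, List.range_succ]

theorem pvS_cons (g : Nat → Int) (j t : Nat) :
    pvS (pvSh g j) (t + 1) = g j + pvS (pvSh g (j + 1)) t := by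
  have h2 : (pvSh g j) ∘ Nat.succ = pvSh g (j + 1) := by
    funext u; simp only [pvSh, Function.comp]; congr 1; omega
  simp only [pvS, List.range_succ_eq_map, List.map_cons, List.map_map, List.sum_cons]
  rw [h2]
  congr 1

theorem pvMv_cons (g : Nat → Int) (j k : Nat) :
    pvMv (pvSh g j) (k + 1) = min 0 (g j + pvMv (pvSh g (j + 1)) k) := by
  induction k with
  | zero =>
      have h := pvS_cons g j 0
      simp [pvMv, h, pvS_zero]
  | succ k ih =>
      show min (pvMv (pvSh g j) (k + 1)) (pvS (pvSh g j) (k + 2)) = _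
      rw [ih, pvS_cons g j (k + 1)]
      show _ = min 0 (g j + min (pvMv (pvSh g (j + 1)) k) (pvS (pvSh g (j + 1)) (k + 1)))
      rw [← min_add_add_left, ← min_assoc]

theorem pvIx_cons (g : Nat → Int) (j k : Nat) :
    pvIx (pvSh g j) (k + 1)
      = if 0 ≤ g j + pvMv (pvSh g (j + 1)) k then 0 else 1 + pvIx (pvSh g (j + 1)) k := by
  induction k with
  | zero =>
      have h := pvS_cons g j 0
      simp only [pvIx, pvMv, h, pvS_zero]
      split_ifs <;> omega
  | succ k ih =>
      show (if pvS (pvSh g j) (k + 2) < pvMv (pvSh g j) (k + 1) then k + 2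
            else pvIx (pvSh g j) (k + 1)) = _
      rw [ih, pvS_cons g j (k + 1), pvMv_cons g j k]
      show _ = if 0 ≤ g j + min (pvMv (pvSh g (j + 1)) k) (pvS (pvSh g (j + 1)) (k + 1)) then 0
               else 1 + (if pvS (pvSh g (j + 1)) (k + 1) < pvMv (pvSh g (j + 1)) k then k + 1
                         else pvIx (pvSh g (j + 1)) k)
      split_ifs <;> omega

theorem pvGoR_spec (g : Nat → Int) (k : Nat) : ∀ j : Nat,
    pvGoR g j k = (((j + pvIx (pvSh g j) k : Nat) : Int), pvMv (pvSh g j) k) := by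
  induction k with
  | zero => intro j; simp [pvGoR, pvIx, pvMv]
  | succ k ih =>
      intro j
      show (let st := pvGoR g (j + 1) k
            let rel := st.2 + g j
            if 0 ≤ rel then ((j : Int), 0) else (st.1, rel)) = _
      rw [ih (j + 1), pvIx_cons g j k, pvMv_cons g j k]
      simp only
      by_cases h : 0 ≤ pvMv (pvSh g (j + 1)) k + g j
      · rw [if_pos h, if_pos (by omega), min_eq_left (by omega)]
        simp
      · rw [if_neg h, if_neg (by omega), min_eq_right (by omega)]
        simp only [Prod.mk.injEq]
        exact ⟨by congr 1; omega, by ring⟩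

-- A's fused loop computes (running sum, earliest argmin, min value).
theorem pv_foldA (g : Nat → Int) (m : Nat) :
    (List.range m).foldl
      (fun (st : Int × Int × Int) (k : Nat) =>
        let m' := st.1 + g k
        if m' < st.2.2 then (m', (1 : Int) + (k : Int), m')
        else (m', st.2.1, st.2.2))
      (0, 0, 0)
    = (pvS g m, ((pvIx g m : Nat) : Int), pvMv g m) := by
  induction m with
  | zero => simp [pvS, pvMv, pvIx]
  | succ m ih =>
      rw [List.range_succ, List.foldl_append, ih]
      simp only [List.foldl_cons, List.foldl_nil]
      have hs : pvS g m + g m = pvS g (m + 1) := (pvS_succ g m).symm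
      by_cases h : pvS g (m + 1) < pvMv g m
      · simp only [hs, pvMv, pvIx, if_pos h, min_eq_right (le_of_lt h)]
        push_cast; ring_nf
      · simp only [hs, pvMv, pvIx, if_neg h, min_eq_left (not_lt.mp h)]

-- B's reverse loop, as a foldr over ascending indices, is pvGoR.
theorem pv_foldrB (g : Nat → Int) (k : Nat) : ∀ j : Nat,
    (List.range k).foldr
      (fun (u : Nat) (st : Int × Int) =>
        let rel := st.2 + g (j + u)
        if 0 ≤ rel then (((j + u : Nat) : Int), 0) else (st.1, rel))
      (((j + k : Nat) : Int), 0)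
    = pvGoR g j k := by
  induction k with
  | zero => intro j; simp [pvGoR]
  | succ k ih =>
      intro j
      rw [List.range_succ_eq_map, List.foldr_cons, List.foldr_map]
      have hinner :
          (List.range k).foldr
            (fun (u : Nat) (st : Int × Int) =>
              let rel := st.2 + g (j + (u + 1))
              if 0 ≤ rel then (((j + (u + 1) : Nat) : Int), 0) else (st.1, rel))
            (((j + (k + 1) : Nat) : Int), 0)
          = pvGoR g (j + 1) k := by
        rw [← ih (j + 1)]
        have hf : (fun (u : Nat) (st : Int × Int) =>
              let rel := st.2 + g (j + (u + 1))
              if 0 ≤ rel then (((j + (u + 1) : Nat) : Int), 0) else (st.1, rel))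
            = (fun (u : Nat) (st : Int × Int) =>
              let rel := st.2 + g (j + 1 + u)
              if 0 ≤ rel then (((j + 1 + u : Nat) : Int), 0) else (st.1, rel)) := by
          funext u st
          have : j + (u + 1) = j + 1 + u := by omega
          rw [this]
        rw [hf]
        congr 2
        omega
      rw [hinner]
      show (let rel := (pvGoR g (j + 1) k).2 + g (j + 0)
            if 0 ≤ rel then (((j + 0 : Nat) : Int), 0) else ((pvGoR g (j + 1) k).1, rel))
        = pvGoR g j (k + 1)
      simp only [Nat.add_zero]
      rfl

-- ===== VERDICT (by name: the statement is the Claim_ definition above) =====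
theorem valid_starting_city_spec : Claim_equal_valid_starting_city := by
  intro distances fuel mpg _ _
  unfold Spec_valid_starting_city valid_starting_city valid_starting_city_alt
  simp only []
  set g : Nat → Int := fun k =>
    PySem.List.pyGetD fuel (k : Int) 0 * mpg - PySem.List.pyGetD distances (k : Int) 0 with hg
  cases hn : distances.length with
  | zero =>
      simp only [Nat.cast_zero]
      rw [PySem.List.pyRange_one_eq_nil (by norm_num),
          PySem.List.pyRange_neg_one_eq_nil (by norm_num)]
      simp
  | succ m =>
      -- A side
      rw [PySem.List.pyRange_one, List.foldl_map]
      have hA : (fun (st : Int × Int × Int) (k : Nat) =>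
            (fun (st : Int × Int × Int) (i : Int) =>
              let dist_from_prev := PySem.List.pyGetD distances (i - 1) 0
              let fuel_from_prev := PySem.List.pyGetD fuel (i - 1) 0
              let miles_rem := st.1 + (fuel_from_prev * mpg - dist_from_prev)
              if miles_rem < st.2.2 then (miles_rem, i, miles_rem)
              else (miles_rem, st.2.1, st.2.2)) st ((1 : Int) + (k : Int)))
          = (fun (st : Int × Int × Int) (k : Nat) =>
              let m' := st.1 + g k
              if m' < st.2.2 then (m', (1 : Int) + (k : Int), m')
              else (m', st.2.1, st.2.2)) := by
        funext st k
        simp only [hg, add_sub_cancel_left]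
      have hmA : (((m + 1 : Nat) : Int) - 1).toNat = m := by omega
      rw [hA, hmA, pv_foldA]
      -- B side
      rw [PySem.List.pyRange_neg_one_eq_reverse, List.foldl_reverse]
      have h01 : ((-1 : Int) + 1) = 0 := by norm_num
      have h21 : (((m + 1 : Nat) : Int) - 2 + 1) = ((m + 1 : Nat) : Int) - 1 := by ring
      rw [h01, h21, PySem.List.pyRange_one, List.foldr_map]
      have hinit : max (((m + 1 : Nat) : Int) - 1) 0 = ((0 + m : Nat) : Int) := by
        push_cast; omega
      have hmB : ((((m + 1 : Nat) : Int) - 1) - 0).toNat = m := by omega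
      have hB : (fun (k : Nat) (st : Int × Int) =>
            (fun (st : Int × Int) (j : Int) =>
              let rel := st.2 + (PySem.List.pyGetD fuel j 0 * mpg - PySem.List.pyGetD distances j 0)
              if 0 ≤ rel then (j, (0 : Int)) else (st.1, rel)) st ((0 : Int) + (k : Int)))
          = (fun (u : Nat) (st : Int × Int) =>
              let rel := st.2 + g (0 + u)
              if 0 ≤ rel then (((0 + u : Nat) : Int), 0) else (st.1, rel)) := by
        funext u st
        simp only [hg, zero_add]
      rw [hmB, hinit, hB, pv_foldrB g m 0, pvGoR_spec]
      have hsh : pvSh g 0 = g := by funext u; simp [pvSh]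
      rw [hsh]
      simp
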